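-- pv_equiv track=rewrite | github.com/fe1t/nlp_project | main.py | cycle_list
-- ===== SOURCE A (Python) =====
-- def cycle_list(start, prefix_checklist):
--     start = (start - 7) % 8
--     end = (start - 2) % 8
--     ans = list()
--     while start != end:
--         ans.append(prefix_checklist[start])
--         start = (start + 1) % 8
--     ans.append(prefix_checklist[end])
--     return ans
-- ===== SOURCE B (Python) =====
-- def cycle_list(start, prefix_checklist):
--     s = (start - 7) % 8
--     order = list(range(s, 8)) + list(range(0, s))  # the 8 cyclic positions starting at s
--     return [prefix_checklist[i] for i in order[:7]]
-- ===== Notes on version B (the rewrite author's own statement) =====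
-- stated objective: idiomatic
-- what changed: Replaces the modular-index while-loop (with its separate end sentinel and final append) by precomputing the cyclic order of the 8 positions as two ranges and returning a comprehension over the first 7 of them.
import Mathlib
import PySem

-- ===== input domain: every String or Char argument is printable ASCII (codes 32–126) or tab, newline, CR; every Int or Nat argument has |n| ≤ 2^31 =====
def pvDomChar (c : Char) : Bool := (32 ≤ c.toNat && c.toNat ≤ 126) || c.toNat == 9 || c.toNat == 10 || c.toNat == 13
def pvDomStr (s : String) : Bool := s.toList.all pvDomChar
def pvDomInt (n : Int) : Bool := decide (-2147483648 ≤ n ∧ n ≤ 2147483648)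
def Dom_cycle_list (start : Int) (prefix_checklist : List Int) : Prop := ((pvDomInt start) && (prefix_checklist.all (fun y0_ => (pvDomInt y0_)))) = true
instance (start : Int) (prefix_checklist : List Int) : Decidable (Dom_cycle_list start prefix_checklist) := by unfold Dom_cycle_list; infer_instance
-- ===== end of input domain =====

-- B precomputes the cyclic order of the 8 positions as two ranges and comprehends over the first 7,
-- instead of A's modular-index while-loop with an end sentinel and a final append (idiomatic; same result).

-- ===== PORT A =====
-- the while-loop: while s != e: ans.append(L[s]); s = (s+1) % 8  (fuel 8 only makes it total; the loop runs 6 times)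
def cycleLoop (L : List Int) (e : Int) (fuel : Nat) (s : Int) (acc : List Int) : List Int :=
  match fuel with
  | 0 => acc
  | f + 1 =>
      if s = e then acc
      else cycleLoop L e f (PySem.Int.mod (s + 1) 8) (acc ++ [PySem.List.pyGetD L s 0])

def cycle_list (start : Int) (prefix_checklist : List Int) : List Int :=
  cycleLoop prefix_checklist
      (PySem.Int.mod (PySem.Int.mod (start - 7) 8 - 2) 8) 8 (PySem.Int.mod (start - 7) 8) []
    ++ [PySem.List.pyGetD prefix_checklist (PySem.Int.mod (PySem.Int.mod (start - 7) 8 - 2) 8) 0]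

-- ===== PORT B =====
def cycle_list_alt (start : Int) (prefix_checklist : List Int) : List Int :=
  (PySem.List.slice
      (PySem.List.pyRange (PySem.Int.mod (start - 7) 8) 8 1 ++ PySem.List.pyRange 0 (PySem.Int.mod (start - 7) 8) 1)
      none (some 7)).map
    (fun i => PySem.List.pyGetD prefix_checklist i 0)

-- ===== PRECONDITION & SPEC =====
-- Pre_ admits exactly the inputs on which both Pythons return (IndexError otherwise): a list of
-- length ≥ 8, or the one length-7 corner where the skipped index is 7 so index 7 is never read.
def Pre_cycle_list (start : Int) (prefix_checklist : List Int) : Prop :=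
  8 ≤ prefix_checklist.length ∨ (prefix_checklist.length = 7 ∧ PySem.Int.mod start 8 = 7)
instance (start : Int) (prefix_checklist : List Int) : Decidable (Pre_cycle_list start prefix_checklist) := by unfold Pre_cycle_list; infer_instance
def pvWitness_cycle_list : Int × List Int := (0, [1, 2, 3, 4, 5, 6, 7, 8])
def Spec_cycle_list (start : Int) (prefix_checklist : List Int) (out : List Int) : Prop := out = cycle_list_alt start prefix_checklist
instance (start : Int) (prefix_checklist : List Int) (out : List Int) : Decidable (Spec_cycle_list start prefix_checklist out) := by unfold Spec_cycle_list; infer_instance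

-- ===== CLAIM (what is proved, stated in full; the proofs are below) =====
def Claim_equal_cycle_list : Prop := ∀ (start : Int) (prefix_checklist : List Int), Dom_cycle_list start prefix_checklist → Pre_cycle_list start prefix_checklist → Spec_cycle_list start prefix_checklist (cycle_list start prefix_checklist)

-- ===== LEMMAS AND PROOFS =====

-- with s = (start-7)%8 abstracted, each of the 8 possible s values makes both sides compute
lemma cycle_eq_of_long (s : Int) (h0 : 0 ≤ s) (h8 : s < 8)
    (a b c d e f g h : Int) (t : List Int) :
    cycleLoop (a :: b :: c :: d :: e :: f :: g :: h :: t) (PySem.Int.mod (s - 2) 8) 8 s []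
      ++ [PySem.List.pyGetD (a :: b :: c :: d :: e :: f :: g :: h :: t) (PySem.Int.mod (s - 2) 8) 0]
    = (PySem.List.slice
        (PySem.List.pyRange s 8 1 ++ PySem.List.pyRange 0 s 1) none (some 7)).map
        (fun i => PySem.List.pyGetD (a :: b :: c :: d :: e :: f :: g :: h :: t) i 0) := by
  interval_cases s
  · rw [(by decide : PySem.List.pyRange (0:Int) 8 1 ++ PySem.List.pyRange 0 0 1 = [0, 1, 2, 3, 4, 5, 6, 7])]
    norm_num [cycleLoop, Int.fmod_eq_emod, PySem.List.pyGetD_ofNat', PySem.List.slice]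
    try rfl
  · rw [(by decide : PySem.List.pyRange (1:Int) 8 1 ++ PySem.List.pyRange 0 1 1 = [1, 2, 3, 4, 5, 6, 7, 0])]
    norm_num [cycleLoop, Int.fmod_eq_emod, PySem.List.pyGetD_ofNat', PySem.List.slice]
    try rfl
  · rw [(by decide : PySem.List.pyRange (2:Int) 8 1 ++ PySem.List.pyRange 0 2 1 = [2, 3, 4, 5, 6, 7, 0, 1])]
    norm_num [cycleLoop, Int.fmod_eq_emod, PySem.List.pyGetD_ofNat', PySem.List.slice]
    try rfl
  · rw [(by decide : PySem.List.pyRange (3:Int) 8 1 ++ PySem.List.pyRange 0 3 1 = [3, 4, 5, 6, 7, 0, 1, 2])]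
    norm_num [cycleLoop, Int.fmod_eq_emod, PySem.List.pyGetD_ofNat', PySem.List.slice]
    try rfl
  · rw [(by decide : PySem.List.pyRange (4:Int) 8 1 ++ PySem.List.pyRange 0 4 1 = [4, 5, 6, 7, 0, 1, 2, 3])]
    norm_num [cycleLoop, Int.fmod_eq_emod, PySem.List.pyGetD_ofNat', PySem.List.slice]
    try rfl
  · rw [(by decide : PySem.List.pyRange (5:Int) 8 1 ++ PySem.List.pyRange 0 5 1 = [5, 6, 7, 0, 1, 2, 3, 4])]
    norm_num [cycleLoop, Int.fmod_eq_emod, PySem.List.pyGetD_ofNat', PySem.List.slice]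
    try rfl
  · rw [(by decide : PySem.List.pyRange (6:Int) 8 1 ++ PySem.List.pyRange 0 6 1 = [6, 7, 0, 1, 2, 3, 4, 5])]
    norm_num [cycleLoop, Int.fmod_eq_emod, PySem.List.pyGetD_ofNat', PySem.List.slice]
    try rfl
  · rw [(by decide : PySem.List.pyRange (7:Int) 8 1 ++ PySem.List.pyRange 0 7 1 = [7, 0, 1, 2, 3, 4, 5, 6])]
    norm_num [cycleLoop, Int.fmod_eq_emod, PySem.List.pyGetD_ofNat', PySem.List.slice]
    try rfl

lemma cycle_eq_of_seven (a b c d e f g : Int) :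
    cycleLoop [a, b, c, d, e, f, g] (PySem.Int.mod (0 - 2) 8) 8 0 []
      ++ [PySem.List.pyGetD [a, b, c, d, e, f, g] (PySem.Int.mod (0 - 2) 8) 0]
    = (PySem.List.slice
        (PySem.List.pyRange 0 8 1 ++ PySem.List.pyRange 0 0 1) none (some 7)).map
        (fun i => PySem.List.pyGetD [a, b, c, d, e, f, g] i 0) := by
  rfl

-- ===== VERDICT (by name: the statement is the Claim_ definition above) =====
theorem cycle_list_spec : Claim_equal_cycle_list := by
  intro start L _ hpre
  unfold Spec_cycle_list cycle_list cycle_list_alt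
  rcases hpre with hlen | ⟨hlen, hmod⟩
  · match L, hlen with
    | a :: b :: c :: d :: e :: f :: g :: h :: t, _ =>
      exact cycle_eq_of_long _ (PySem.Int.mod_nonneg _ (by norm_num))
        (PySem.Int.mod_lt _ (by norm_num)) a b c d e f g h t
  · have hs : PySem.Int.mod (start - 7) 8 = 0 := by
      rw [PySem.Int.mod_eq_emod_of_pos (by norm_num)] at hmod ⊢
      omega
    rw [hs]
    match L, hlen with
    | [a, b, c, d, e, f, g], _ => exact cycle_eq_of_seven a b c d e f g
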